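-- pv_equiv track=rewrite | github.com/FaceDeer/calibre_full_mcp_server | src/worker.py | _get_best_source_format
-- ===== SOURCE A (Python) =====
-- SOURCE_FORMAT_PRIORITY = ['LIT', 'MOBI', 'AZW', 'EPUB', 'AZW3', 'FB2', 'DOCX', 'HTML', 'PRC', 'RTF', 'TXT', 'PDF']
--
-- def _get_best_source_format(available_formats):
--     """
--     Select the best source format from available formats.
--     """
--     if not available_formats:
--         return None
--     available_upper = [f.upper() for f in available_formats]
--     for fmt in SOURCE_FORMAT_PRIORITY:
--         if fmt in available_upper:
--             return fmt
--     # Fallback: pick the first one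
--     if available_upper:
--         return available_upper[0]
--     return None
-- ===== SOURCE B (Python) =====
-- SOURCE_FORMAT_PRIORITY = ['LIT', 'MOBI', 'AZW', 'EPUB', 'AZW3', 'FB2', 'DOCX', 'HTML', 'PRC', 'RTF', 'TXT', 'PDF']
--
-- def _get_best_source_format(available_formats):
--     """
--     Select the best source format from available formats.
--     """
--     if not available_formats:
--         return None
--     available_upper = [f.upper() for f in available_formats]
--     rank = {fmt: i for i, fmt in enumerate(SOURCE_FORMAT_PRIORITY)}
--     n = len(SOURCE_FORMAT_PRIORITY)
--     best = n
--     for f in available_upper: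
--         r = rank.get(f, n)
--         if r < best:
--             best = r
--     if best < n:
--         return SOURCE_FORMAT_PRIORITY[best]
--     return available_upper[0]
-- ===== Notes on version B (the rewrite author's own statement) =====
-- stated objective: alternative
-- what changed: Replaces the scan over SOURCE_FORMAT_PRIORITY with membership tests against the input by a single pass over the input keeping a running minimum of ranks looked up in a precomputed {format: index} dict.
import Mathlib
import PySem

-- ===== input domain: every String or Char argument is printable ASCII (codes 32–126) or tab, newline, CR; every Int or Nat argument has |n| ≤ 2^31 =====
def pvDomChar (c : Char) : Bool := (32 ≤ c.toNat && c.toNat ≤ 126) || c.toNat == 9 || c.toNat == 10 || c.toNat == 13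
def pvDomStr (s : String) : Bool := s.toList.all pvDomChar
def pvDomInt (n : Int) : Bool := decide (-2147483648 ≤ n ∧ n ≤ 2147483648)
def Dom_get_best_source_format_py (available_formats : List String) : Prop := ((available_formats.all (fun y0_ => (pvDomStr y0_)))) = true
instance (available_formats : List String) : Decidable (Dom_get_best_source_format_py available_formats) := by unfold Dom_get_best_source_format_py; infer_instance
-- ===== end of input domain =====

-- B replaces A's scan of the priority list (membership test per priority) by one pass over the
-- input keeping a running minimum rank from a precomputed format→index dictionary (alternative).


-- ===== PORT A =====
def SRC_FORMAT_PRIORITY : List String :=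
  ["LIT", "MOBI", "AZW", "EPUB", "AZW3", "FB2", "DOCX", "HTML", "PRC", "RTF", "TXT", "PDF"]

-- the `for fmt in SOURCE_FORMAT_PRIORITY` loop with its early return, then A's fallback
def aScan (prio : List String) (up : List String) : Option String :=
  match prio with
  | [] => match up with
          | [] => none
          | a :: _ => some a
  | fmt :: rest => if up.contains fmt then some fmt else aScan rest up

def get_best_source_format_py (available_formats : List String) : Option String :=
  if available_formats.isEmpty then none
  else aScan SRC_FORMAT_PRIORITY (available_formats.map PySem.Str.upper)

-- ===== PORT B =====
-- rank = {fmt: i for i, fmt in enumerate(SOURCE_FORMAT_PRIORITY)}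
def rankD : PySem.Dict String Int :=
  (PySem.List.enumerate SRC_FORMAT_PRIORITY).foldl (fun d p => d.insert p.2 p.1) PySem.Dict.empty

def get_best_source_format_py_alt (available_formats : List String) : Option String :=
  if available_formats.isEmpty then none
  else
    let up := available_formats.map PySem.Str.upper
    let best := up.foldl (fun b f => let r := rankD.getD f 12; if r < b then r else b) 12
    if best < 12 then PySem.List.pyGet? SRC_FORMAT_PRIORITY best else up.head?

-- ===== PRECONDITION & SPEC =====
def Spec_get_best_source_format_py (available_formats : List String) (out : Option String) : Prop := out = get_best_source_format_py_alt available_formats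
instance (available_formats : List String) (out : Option String) : Decidable (Spec_get_best_source_format_py available_formats out) := by unfold Spec_get_best_source_format_py; infer_instance

-- ===== CLAIM (what is proved, stated in full; the proofs are below) =====
def Claim_equal_get_best_source_format_py : Prop := ∀ (available_formats : List String), Dom_get_best_source_format_py available_formats → Spec_get_best_source_format_py available_formats (get_best_source_format_py available_formats)

-- ===== LEMMAS AND PROOFS =====

theorem src_len : SRC_FORMAT_PRIORITY.length = 12 := rfl

theorem src_nodup : SRC_FORMAT_PRIORITY.Nodup := by decide

-- the rank dictionary lookup is the index in the priority list (12 = its length, when absent)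
theorem rank_eq_idxOf (u : String) : rankD.getD u 12 = (SRC_FORMAT_PRIORITY.idxOf u : Int) := by
  by_cases hmem : u ∈ SRC_FORMAT_PRIORITY
  · fin_cases hmem <;> decide
  · have hc : rankD.contains u = false := by
      rw [PySem.Dict.contains_eq_decide_mem_keys]
      have : rankD.keys = SRC_FORMAT_PRIORITY := by decide
      rw [this]; simpa using hmem
    rw [PySem.Dict.getD_of_not_contains _ _ hc, List.idxOf_eq_length_iff.mpr hmem]
    rfl

-- folding the running-minimum step is folding `min`
theorem fold_step_eq_min :
    (fun (b : Int) (f : String) => let r := rankD.getD f 12; if r < b then r else b)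
      = (fun (b : Int) (f : String) => min b (rankD.getD f 12)) := by
  funext b f
  simp only [min_def]
  split_ifs <;> omega

theorem foldl_min_le {α : Type} (g : α → Int) (l : List α) (b : Int) :
    l.foldl (fun b u => min b (g u)) b ≤ b ∧ ∀ u ∈ l, l.foldl (fun b u => min b (g u)) b ≤ g u := by
  induction l generalizing b with
  | nil => simp
  | cons x xs ih =>
      obtain ⟨h1, h2⟩ := ih (min b (g x))
      refine ⟨le_trans h1 (by omega), ?_⟩
      intro u hu
      rcases List.mem_cons.mp hu with rfl | hu
      · exact le_trans h1 (by omega)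
      · exact h2 u hu

theorem foldl_min_attained {α : Type} (g : α → Int) (l : List α) (b : Int) :
    l.foldl (fun b u => min b (g u)) b = b ∨ ∃ u ∈ l, l.foldl (fun b u => min b (g u)) b = g u := by
  induction l generalizing b with
  | nil => simp
  | cons x xs ih =>
      rcases ih (min b (g x)) with h | ⟨u, hu, h⟩
      · rcases le_or_gt b (g x) with hle | hlt
        · left; simpa [min_eq_left hle] using h
        · right; exact ⟨x, by simp, by simpa [min_eq_right (le_of_lt hlt)] using h⟩
      · right; exact ⟨u, by simp [hu], h⟩

-- A's scan hits exactly the least present index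
theorem aScan_eq_of_least (Q U : List String) (k : Nat) (hk : k < Q.length)
    (hmem : Q[k] ∈ U) (hmin : ∀ j (hj : j < k), Q[j]'(by omega) ∉ U) :
    aScan Q U = some Q[k] := by
  induction Q generalizing k with
  | nil => simp at hk
  | cons q qs ih =>
      cases k with
      | zero => simp_all [aScan]
      | succ k' =>
          have hq : q ∉ U := by simpa using hmin 0 (Nat.succ_pos _)
          have hstep : aScan (q :: qs) U = aScan qs U := by
            simp [aScan, hq]
          rw [hstep]
          exact ih k' (by simpa using hk) (by simpa using hmem)
            (fun j hj => by simpa using hmin (j+1) (by omega))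

-- A's scan falls through to the first element when nothing from Q is present
theorem aScan_none (Q U : List String) (h : ∀ q ∈ Q, q ∉ U) :
    aScan Q U = U.head? := by
  induction Q with
  | nil => cases U <;> simp [aScan]
  | cons q qs ih =>
      have hq : q ∉ U := h q (by simp)
      simp [aScan, hq, ih (fun q hq' => h q (by simp [hq']))]

-- ===== VERDICT (by name: the statement is the Claim_ definition above) =====
theorem get_best_source_format_py_spec : Claim_equal_get_best_source_format_py := by
  intro fs _
  show get_best_source_format_py fs = get_best_source_format_py_alt fs
  unfold get_best_source_format_py get_best_source_format_py_alt
  cases fs with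
  | nil => simp
  | cons f0 rest =>
      simp only [List.isEmpty_cons, Bool.false_eq_true, if_false]
      set U := (f0 :: rest).map PySem.Str.upper with hU
      rw [fold_step_eq_min]
      set m := U.foldl (fun b f => min b (rankD.getD f 12)) 12 with hm
      have hle := foldl_min_le (fun f => rankD.getD f 12) U 12
      have hatt := foldl_min_attained (fun f => rankD.getD f 12) U 12
      rw [← hm] at hle hatt
      by_cases hlt : m < 12
      · -- some format is present; m = least present index
        rcases hatt with h12 | ⟨u, hu, hmu⟩
        · omega
        rw [rank_eq_idxOf] at hmu
        have humem : u ∈ SRC_FORMAT_PRIORITY := by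
          by_contra habs
          rw [List.idxOf_eq_length_iff.mpr habs, src_len] at hmu
          omega
        have hklt : SRC_FORMAT_PRIORITY.idxOf u < 12 := by
          have := List.idxOf_lt_length_iff.mpr humem
          rw [src_len] at this
          exact this
        have hget : SRC_FORMAT_PRIORITY[SRC_FORMAT_PRIORITY.idxOf u]'(src_len ▸ hklt) = u :=
          List.getElem_idxOf _
        have hA : aScan SRC_FORMAT_PRIORITY U = some u := by
          rw [← hget]
          apply aScan_eq_of_least _ _ _ (src_len ▸ hklt)
          · rw [hget]; exact hu
          · intro j hj hmemj
            have hje : SRC_FORMAT_PRIORITY.idxOf (SRC_FORMAT_PRIORITY[j]'(by rw [src_len]; omega))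
                = j := src_nodup.idxOf_getElem _ _
            have hge := hle.2 _ hmemj
            rw [rank_eq_idxOf, hje] at hge
            omega
        have hB : PySem.List.pyGet? SRC_FORMAT_PRIORITY m = some u := by
          rw [hmu, PySem.List.pyGet?_natCast]
          rw [List.getElem?_eq_getElem (src_len ▸ hklt)]
          rw [hget]
        rw [if_pos hlt, hA, hB]
      · -- nothing present: both fall back to the first upper-cased element
        have habsent : ∀ q ∈ SRC_FORMAT_PRIORITY, q ∉ U := by
          intro q hq hqU
          have hge := hle.2 q hqU
          rw [rank_eq_idxOf] at hge
          have hidx := List.idxOf_lt_length_iff.mpr hq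
          rw [src_len] at hidx
          omega
        rw [aScan_none _ _ habsent, if_neg hlt]
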